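-- pv_equiv track=rewrite | github.com/uddy246/life-chart-api | src/life_chart_api/synthesis/overlay_chinese.py | _favourable_elements
-- ===== SOURCE A (Python) =====
-- _ELEMENTS = ["wood", "fire", "earth", "metal", "water"]
--
-- _GENERATES = {
--     "wood": "fire",
--     "fire": "earth",
--     "earth": "metal",
--     "metal": "water",
--     "water": "wood",
-- }
--
-- _CONTROLS = {
--     "wood": "earth",
--     "earth": "water",
--     "water": "fire",
--     "fire": "metal",
--     "metal": "wood",
-- }
--
-- def _favourable_elements(dm_element: str, strength: str) -> tuple[list[str], list[str]]:
--     resource = None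
--     for element, generated in _GENERATES.items():
--         if generated == dm_element:
--             resource = element
--             break
--     output = _GENERATES.get(dm_element)
--     wealth = _CONTROLS.get(dm_element)
--     authority = None
--     for element, controlled in _CONTROLS.items():
--         if controlled == dm_element:
--             authority = element
--             break
--
--     if strength == "weak":
--         favourable = [dm_element, resource]
--         unfavourable = [output, wealth, authority]
--     elif strength == "strong":
--         favourable = [output, wealth, authority]
--         unfavourable = [dm_element, resource]
--     else:
--         favourable = [output, wealth]
--         unfavourable = [resource]
--
--     fav = [e for e in favourable if e in _ELEMENTS]
--     unfav = [e for e in unfavourable if e in _ELEMENTS]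
--     return fav, unfav
-- ===== SOURCE B (Python) =====
-- _ELEMENTS = ["wood", "fire", "earth", "metal", "water"]
--
--
-- def _favourable_elements(dm_element: str, strength: str) -> tuple[list[str], list[str]]:
--     # Closed-form: the generating cycle is _ELEMENTS in order, so every derived
--     # role is a fixed modular offset from the day-master's index.
--     if dm_element not in _ELEMENTS:
--         return [], []
--     i = _ELEMENTS.index(dm_element)
--     resource = _ELEMENTS[(i - 1) % 5]
--     output = _ELEMENTS[(i + 1) % 5]
--     wealth = _ELEMENTS[(i + 2) % 5]
--     authority = _ELEMENTS[(i - 2) % 5]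
--     if strength == "weak":
--         return [dm_element, resource], [output, wealth, authority]
--     if strength == "strong":
--         return [output, wealth, authority], [dm_element, resource]
--     return [output, wealth], [resource]
-- ===== Notes on version B (the rewrite author's own statement) =====
-- stated objective: simpler
-- what changed: B replaces A's forward/reverse scans of the _GENERATES/_CONTROLS dicts and the final None-filtering pass by a single index lookup in the element cycle with closed-form modular offsets (-1,+1,+2,-2), returning empty lists up front for an unknown day-master element.
import Mathlib
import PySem

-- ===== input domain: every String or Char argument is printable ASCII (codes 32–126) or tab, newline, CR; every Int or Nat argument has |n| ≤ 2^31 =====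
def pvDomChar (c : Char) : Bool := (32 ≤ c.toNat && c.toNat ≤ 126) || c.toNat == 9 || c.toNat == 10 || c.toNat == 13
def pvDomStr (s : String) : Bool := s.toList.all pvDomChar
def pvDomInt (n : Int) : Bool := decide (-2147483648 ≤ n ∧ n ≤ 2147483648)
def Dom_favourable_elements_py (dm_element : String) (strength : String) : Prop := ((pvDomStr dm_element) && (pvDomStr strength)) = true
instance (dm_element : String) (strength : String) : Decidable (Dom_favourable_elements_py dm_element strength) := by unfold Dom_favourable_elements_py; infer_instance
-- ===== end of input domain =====

-- B replaces A's dict scans and None-filter by one index lookup plus closed-form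
-- modular offsets in the element cycle (objective: simpler).

-- ===== PORT A =====
def pyElements : List String := ["wood", "fire", "earth", "metal", "water"]

def pyGenerates : PySem.Dict String String :=
  PySem.Dict.ofList [("wood","fire"),("fire","earth"),("earth","metal"),("metal","water"),("water","wood")]

def pyControls : PySem.Dict String String :=
  PySem.Dict.ofList [("wood","earth"),("earth","water"),("water","fire"),("fire","metal"),("metal","wood")]

-- 'for k, v in d.items(): if v == target: found = k; break' — first key whose value matches
def pyFindKeyByVal (items : List (String × String)) (target : String) : Option String :=
  match items with
  | [] => none
  | (k, v) :: rest => if v == target then some k else pyFindKeyByVal rest target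

-- '[e for e in xs if e in _ELEMENTS]' over a list of Optional[str] (None never ∈ _ELEMENTS)
def pyFilterElems (xs : List (Option String)) : List String :=
  xs.filterMap (fun e => match e with
    | some s => if s ∈ pyElements then some s else none
    | none => none)

def favourable_elements_py (dm_element : String) (strength : String) : List String × List String :=
  let resource := pyFindKeyByVal pyGenerates.items dm_element
  let output := pyGenerates.get? dm_element
  let wealth := pyControls.get? dm_element
  let authority := pyFindKeyByVal pyControls.items dm_element
  let fu : List (Option String) × List (Option String) :=
    if strength == "weak" then
      ([some dm_element, resource], [output, wealth, authority])
    else if strength == "strong" then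
      ([output, wealth, authority], [some dm_element, resource])
    else
      ([output, wealth], [resource])
  (pyFilterElems fu.1, pyFilterElems fu.2)

-- ===== PORT B =====
-- _ELEMENTS[j % 5]; the index is always in range here, so the getD default is never used
def pyElemAt (j : Int) : String :=
  (PySem.List.pyGet? pyElements (PySem.Int.mod j 5)).getD ""

def favourable_elements_py_alt (dm_element : String) (strength : String) : List String × List String :=
  if dm_element ∈ pyElements then
    let i : Int := ((PySem.List.index? pyElements dm_element).getD 0 : Nat)
    let resource := pyElemAt (i - 1)
    let output := pyElemAt (i + 1)
    let wealth := pyElemAt (i + 2)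
    let authority := pyElemAt (i - 2)
    if strength == "weak" then ([dm_element, resource], [output, wealth, authority])
    else if strength == "strong" then ([output, wealth, authority], [dm_element, resource])
    else ([output, wealth], [resource])
  else ([], [])

-- ===== PRECONDITION & SPEC =====
def Spec_favourable_elements_py (dm_element : String) (strength : String) (out : List String × List String) : Prop := out = favourable_elements_py_alt dm_element strength
instance (dm_element : String) (strength : String) (out : List String × List String) : Decidable (Spec_favourable_elements_py dm_element strength out) := by unfold Spec_favourable_elements_py; infer_instance

-- ===== CLAIM (what is proved, stated in full; the proofs are below) =====
def Claim_equal_favourable_elements_py : Prop := ∀ (dm_element : String) (strength : String), Dom_favourable_elements_py dm_element strength → Spec_favourable_elements_py dm_element strength (favourable_elements_py dm_element strength)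

-- ===== LEMMAS AND PROOFS =====

-- For a fixed day-master element, both programs agree for every strength string.
theorem agree_fixed_dm (dm : String) (hdm : dm ∈ pyElements) :
    ∀ strength, favourable_elements_py dm strength = favourable_elements_py_alt dm strength := by
  fin_cases hdm <;> intro s <;>
    by_cases hw : s = "weak" <;> by_cases hs : s = "strong" <;>
      simp_all [favourable_elements_py, favourable_elements_py_alt] <;> rfl

theorem agree_bad_dm (dm : String) (hdm : dm ∉ pyElements) :
    ∀ strength, favourable_elements_py dm strength = favourable_elements_py_alt dm strength := by
  intro s
  simp only [pyElements, List.mem_cons, List.not_mem_nil, or_false, not_or] at hdm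
  obtain ⟨h1, h2, h3, h4, h5⟩ := hdm
  have hg : pyGenerates = PySem.Dict.mk [("wood","fire"),("fire","earth"),("earth","metal"),("metal","water"),("water","wood")] := by rfl
  have hc : pyControls = PySem.Dict.mk [("wood","earth"),("earth","water"),("water","fire"),("fire","metal"),("metal","wood")] := by rfl
  have hr : pyFindKeyByVal pyGenerates.items dm = none := by
    rw [hg]; simp [pyFindKeyByVal, beq_iff_eq, Ne.symm h1, Ne.symm h2, Ne.symm h3, Ne.symm h4, Ne.symm h5]
  have ha : pyFindKeyByVal pyControls.items dm = none := by
    rw [hc]; simp [pyFindKeyByVal, beq_iff_eq, Ne.symm h1, Ne.symm h2, Ne.symm h3, Ne.symm h4, Ne.symm h5]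
  have ho : pyGenerates.get? dm = none := by
    rw [hg]; simp [PySem.Dict.get?_mk_cons, PySem.Dict.get?, beq_iff_eq, Ne.symm h1, Ne.symm h2, Ne.symm h3, Ne.symm h4, Ne.symm h5]
  have hw : pyControls.get? dm = none := by
    rw [hc]; simp [PySem.Dict.get?_mk_cons, PySem.Dict.get?, beq_iff_eq, Ne.symm h1, Ne.symm h2, Ne.symm h3, Ne.symm h4, Ne.symm h5]
  have hdm' : dm ∉ pyElements := by
    simp [pyElements, h1, h2, h3, h4, h5]
  unfold favourable_elements_py favourable_elements_py_alt
  simp only [hr, ha, ho, hw, if_neg hdm']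
  by_cases hwk : s = "weak" <;> by_cases hst : s = "strong" <;>
    simp_all [pyFilterElems, hdm']

-- ===== VERDICT (by name: the statement is the Claim_ definition above) =====
theorem favourable_elements_py_spec : Claim_equal_favourable_elements_py := by
  intro dm s _
  unfold Spec_favourable_elements_py
  by_cases h : dm ∈ pyElements
  · exact agree_fixed_dm dm h s
  · exact agree_bad_dm dm h s
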